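-- pv_equiv track=rewrite | github.com/Tusenka/hackerrank | friend_authority.py | count_profit
-- ===== SOURCE A (Python) =====
-- import heapq
-- from heapq import heappush
--
-- def count_profit(a, profit, loose):
--     profit.sort( key = lambda x: x[0] )
--     i=0
--     friends=[]
--     while i<len(profit) and profit[i][0]<=a:
--         a+=profit[i][1]
--         friends.append(profit[i][2])
--         i+=1
--
--     loose.sort( key = lambda x: x[1]+x[0], reverse=True )
--     loose_auth_friends=[]
--     pos=len(friends)
--     for x in loose:
--         if x[0]<=a:
--             heappush(loose_auth_friends, (x[1], pos))
--             a+=x[1]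
--             friends.append(x[2])
--             pos+=1
--         elif loose_auth_friends:
--             last=loose_auth_friends[0]
--             if last[0]<x[1]:
--                 a+=x[1]
--                 a-=last[0]
--                 friends[last[1]]=x[2]
--                 heapq.heapreplace(loose_auth_friends, (x[1], last[1]))
--
--     return friends
-- ===== SOURCE B (Python) =====
-- def count_profit(a, profit, loose):
--     profit.sort(key=lambda x: x[0])
--     friends = []
--     for x in profit:
--         if x[0] > a:
--             break
--         a += x[1]
--         friends.append(x[2])
--     loose.sort(key=lambda x: x[1] + x[0], reverse=True)
--     entries = []  # flat, unordered list of (auth, pos) pairs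
--     pos = len(friends)
--     for x in loose:
--         if x[0] <= a:
--             entries.append((x[1], pos))
--             a += x[1]
--             friends.append(x[2])
--             pos += 1
--         elif entries:
--             m = min(entries)
--             if m[0] < x[1]:
--                 a += x[1] - m[0]
--                 friends[m[1]] = x[2]
--                 entries.remove(m)
--                 entries.append((x[1], m[1]))
--     return friends
-- ===== Notes on version B (the rewrite author's own statement) =====
-- stated objective: simpler
-- what changed: The heapq min-heap of (auth, pos) entries is replaced by a plain unordered list scanned with min(), removing all heap machinery (heappush/heapreplace); the surrounding greedy loops are unchanged in spirit.
import Mathlib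
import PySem

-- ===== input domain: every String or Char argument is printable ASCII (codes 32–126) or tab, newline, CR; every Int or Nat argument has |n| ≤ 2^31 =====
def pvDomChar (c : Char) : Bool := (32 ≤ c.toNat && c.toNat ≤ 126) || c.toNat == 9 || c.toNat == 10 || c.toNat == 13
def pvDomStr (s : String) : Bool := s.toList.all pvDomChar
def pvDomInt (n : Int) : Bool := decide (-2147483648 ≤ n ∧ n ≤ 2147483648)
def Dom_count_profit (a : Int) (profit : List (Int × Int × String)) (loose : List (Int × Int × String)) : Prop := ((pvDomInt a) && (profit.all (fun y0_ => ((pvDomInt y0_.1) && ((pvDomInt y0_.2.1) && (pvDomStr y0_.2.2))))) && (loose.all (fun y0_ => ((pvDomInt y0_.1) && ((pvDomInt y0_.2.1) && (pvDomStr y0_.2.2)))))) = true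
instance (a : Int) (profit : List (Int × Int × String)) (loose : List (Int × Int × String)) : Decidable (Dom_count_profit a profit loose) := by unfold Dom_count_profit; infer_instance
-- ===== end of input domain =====

-- B replaces A's heapq min-heap by a plain unordered list of (auth, pos) entries scanned
-- with min(); objective: simpler (no heap machinery). Equivalence is about the return
-- value; both versions also sort `profit` and `loose` in place with the same keys.

-- ===== PORT A =====

-- Python tuple comparison (auth, pos) ≤ (auth', pos'), used by heapq.
def lePair (p q : Int × Int) : Bool := p.1 < q.1 || (p.1 == q.1 && p.2 ≤ q.2)

-- heapq's heap of (auth, pos) pairs, ported as a heap-ordered tree (skew-heap merge).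
-- Exact for this program: A only ever reads heap[0], which is the lexicographic minimum
-- of the heap's contents both for heapq's array heap and for this heap-ordered tree.
inductive PHeap : Type
  | nil : PHeap
  | node : (Int × Int) → PHeap → PHeap → PHeap
deriving DecidableEq, Repr

def PHeap.merge : PHeap → PHeap → PHeap
  | .nil, t => t
  | .node x l r, .nil => .node x l r
  | .node x l r, .node y l' r' =>
    if lePair x y then .node x (PHeap.merge r (.node y l' r')) l
    else .node y (PHeap.merge (.node x l r) r') l'
termination_by s t => sizeOf s + sizeOf t
decreasing_by all_goals (simp; try omega)

-- heappush
def PHeap.push (h : PHeap) (x : Int × Int) : PHeap := h.merge (.node x .nil .nil)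

-- heap[0]
def PHeap.peek : PHeap → Option (Int × Int)
  | .nil => none
  | .node x _ _ => some x

-- heapq.heapreplace: drop the root, insert the new item.
def PHeap.replace (h : PHeap) (x : Int × Int) : PHeap :=
  match h with
  | .nil => .node x .nil .nil
  | .node _ l r => (l.merge r).push x

-- the `while i<len(profit) and profit[i][0]<=a` loop of A
def takeFriendsA : Int → List (Int × Int × String) → Int × List String
  | a, [] => (a, [])
  | a, x :: rest =>
    if x.1 ≤ a then
      let p := takeFriendsA (a + x.2.1) rest
      (p.1, x.2.2 :: p.2)
    else (a, [])

-- the `for x in loose` loop of A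
def loopA : List (Int × Int × String) → Int → List String → Int → PHeap → List String
  | [], _, friends, _, _ => friends
  | x :: rest, a, friends, pos, h =>
    if x.1 ≤ a then
      loopA rest (a + x.2.1) (friends ++ [x.2.2]) (pos + 1) (h.push (x.2.1, pos))
    else
      match h.peek with
      | none => loopA rest a friends pos h
      | some last =>
        if last.1 < x.2.1 then
          loopA rest (a + x.2.1 - last.1) (friends.set last.2.toNat x.2.2) pos
            (h.replace (x.2.1, last.2))
        else loopA rest a friends pos h

def count_profit (a : Int) (profit : List (Int × Int × String)) (loose : List (Int × Int × String)) : List String :=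
  let profit' := PySem.List.sorted profit (fun x => x.1) false
  let p := takeFriendsA a profit'
  let loose' := PySem.List.sorted loose (fun x => x.2.1 + x.1) true
  loopA loose' p.1 p.2 (p.2.length : Int) PHeap.nil

-- ===== PORT B =====

-- Python `<` on int pairs (tuple comparison), used by min().
def ltPair (p q : Int × Int) : Bool := p.1 < q.1 || (p.1 == q.1 && p.2 < q.2)

-- min(entries): first minimal element under tuple comparison.
def listMinB : List (Int × Int) → Option (Int × Int)
  | [] => none
  | x :: rest => some (rest.foldl (fun m y => if ltPair y m then y else m) x)

-- the `for x in profit: … break` loop of B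
def takeFriendsB : Int → List (Int × Int × String) → Int × List String
  | a, [] => (a, [])
  | a, x :: rest =>
    if x.1 > a then (a, [])
    else
      let p := takeFriendsB (a + x.2.1) rest
      (p.1, x.2.2 :: p.2)

-- the `for x in loose` loop of B over the flat entries list
def loopB : List (Int × Int × String) → Int → List String → Int → List (Int × Int) → List String
  | [], _, friends, _, _ => friends
  | x :: rest, a, friends, pos, entries =>
    if x.1 ≤ a then
      loopB rest (a + x.2.1) (friends ++ [x.2.2]) (pos + 1) (entries ++ [(x.2.1, pos)])
    else
      match listMinB entries with
      | none => loopB rest a friends pos entries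
      | some m =>
        if m.1 < x.2.1 then
          loopB rest (a + (x.2.1 - m.1)) (friends.set m.2.toNat x.2.2) pos
            (entries.erase m ++ [(x.2.1, m.2)])
        else loopB rest a friends pos entries

def count_profit_alt (a : Int) (profit : List (Int × Int × String)) (loose : List (Int × Int × String)) : List String :=
  let profit' := PySem.List.sorted profit (fun x => x.1) false
  let p := takeFriendsB a profit'
  let loose' := PySem.List.sorted loose (fun x => x.2.1 + x.1) true
  loopB loose' p.1 p.2 (p.2.length : Int) []

-- ===== PRECONDITION & SPEC =====
def Spec_count_profit (a : Int) (profit : List (Int × Int × String)) (loose : List (Int × Int × String)) (out : List String) : Prop := out = count_profit_alt a profit loose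
instance (a : Int) (profit : List (Int × Int × String)) (loose : List (Int × Int × String)) (out : List String) : Decidable (Spec_count_profit a profit loose out) := by unfold Spec_count_profit; infer_instance

-- ===== CLAIM (what is proved, stated in full; the proofs are below) =====
def Claim_equal_count_profit : Prop := ∀ (a : Int) (profit : List (Int × Int × String)) (loose : List (Int × Int × String)), Dom_count_profit a profit loose → Spec_count_profit a profit loose (count_profit a profit loose)

-- ===== LEMMAS AND PROOFS =====

theorem lePair_refl (p : Int × Int) : lePair p p = true := by simp [lePair]

theorem lePair_trans {p q r : Int × Int} (h1 : lePair p q = true) (h2 : lePair q r = true) :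
    lePair p r = true := by
  obtain ⟨a, b⟩ := p; obtain ⟨c, d⟩ := q; obtain ⟨e, f⟩ := r
  simp [lePair] at *; omega

theorem lePair_antisymm {p q : Int × Int} (h1 : lePair p q = true) (h2 : lePair q p = true) :
    p = q := by
  obtain ⟨a, b⟩ := p; obtain ⟨c, d⟩ := q
  simp [lePair] at *; omega

theorem lePair_total (p q : Int × Int) : lePair p q = true ∨ lePair q p = true := by
  obtain ⟨a, b⟩ := p; obtain ⟨c, d⟩ := q
  simp [lePair]; omega

theorem ltPair_le {p q : Int × Int} (h : ltPair p q = true) : lePair p q = true := by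
  obtain ⟨a, b⟩ := p; obtain ⟨c, d⟩ := q
  simp [ltPair, lePair] at *; omega

theorem ltPair_false_le {p q : Int × Int} (h : ¬ ltPair p q = true) : lePair q p = true := by
  obtain ⟨a, b⟩ := p; obtain ⟨c, d⟩ := q
  simp [ltPair, lePair] at *; omega

def PHeap.contentsM : PHeap → Multiset (Int × Int)
  | .nil => 0
  | .node x l r => x ::ₘ (l.contentsM + r.contentsM)

def PHeap.Ordered : PHeap → Prop
  | .nil => True
  | .node x l r =>
      (∀ y ∈ l.contentsM + r.contentsM, lePair x y = true) ∧ l.Ordered ∧ r.Ordered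

theorem merge_contents (s t : PHeap) : (s.merge t).contentsM = s.contentsM + t.contentsM := by
  fun_induction PHeap.merge s t with
  | case1 => simp [PHeap.contentsM]
  | case2 => simp [PHeap.contentsM]
  | case3 x l r y l' r' hle ih =>
    simp [PHeap.contentsM, ih, Multiset.cons_swap, add_comm, add_left_comm, add_assoc]
  | case4 x l r y l' r' hle ih =>
    simp [PHeap.contentsM, ih, Multiset.cons_swap, add_comm, add_left_comm, add_assoc]

theorem ordered_root_le {x : Int × Int} {l r : PHeap} (h : (PHeap.node x l r).Ordered) :
    ∀ y ∈ (PHeap.node x l r).contentsM, lePair x y = true := by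
  intro y hy
  simp only [PHeap.contentsM, Multiset.mem_cons] at hy
  rcases hy with rfl | hy
  · exact lePair_refl _
  · exact h.1 y hy

theorem merge_ordered {s t : PHeap} (hs : s.Ordered) (ht : t.Ordered) : (s.merge t).Ordered := by
  fun_induction PHeap.merge s t with
  | case1 => exact ht
  | case2 => exact hs
  | case3 x l r y l' r' hle ih =>
    obtain ⟨hx, hl, hr⟩ := hs
    refine ⟨?_, ih hr ht, hl⟩
    intro z hz
    rw [Multiset.mem_add, merge_contents] at hz
    rcases hz with hz | hz
    · rw [Multiset.mem_add] at hz
      rcases hz with hz | hz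
      · exact hx z (Multiset.mem_add.mpr (Or.inr hz))
      · exact lePair_trans hle (ordered_root_le ht z hz)
    · exact hx z (Multiset.mem_add.mpr (Or.inl hz))
  | case4 x l r y l' r' hle ih =>
    obtain ⟨hy, hl', hr'⟩ := ht
    have hyx : lePair y x = true := (lePair_total x y).resolve_left (by simpa using hle)
    refine ⟨?_, ih hs hr', hl'⟩
    intro z hz
    rw [Multiset.mem_add, merge_contents] at hz
    rcases hz with hz | hz
    · rw [Multiset.mem_add] at hz
      rcases hz with hz | hz
      · exact lePair_trans hyx (ordered_root_le hs z hz)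
      · exact hy z (Multiset.mem_add.mpr (Or.inr hz))
    · exact hy z (Multiset.mem_add.mpr (Or.inl hz))

theorem push_contents (h : PHeap) (x : Int × Int) :
    (h.push x).contentsM = h.contentsM + {x} := by
  simp [PHeap.push, merge_contents, PHeap.contentsM]

theorem push_ordered {h : PHeap} (hh : h.Ordered) (x : Int × Int) : (h.push x).Ordered := by
  refine merge_ordered hh ⟨?_, trivial, trivial⟩
  intro y hy
  simp [PHeap.contentsM] at hy

theorem listMinB_spec (x : Int × Int) (rest : List (Int × Int)) :
    (rest.foldl (fun m y => if ltPair y m then y else m) x) ∈ x :: rest ∧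
    ∀ y ∈ x :: rest, lePair (rest.foldl (fun m y => if ltPair y m then y else m) x) y = true := by
  induction rest generalizing x with
  | nil =>
    refine ⟨by simp, ?_⟩
    intro y hy
    simp only [List.foldl_nil, List.mem_singleton] at hy ⊢
    subst hy; exact lePair_refl y
  | cons z rest ih =>
    simp only [List.foldl_cons]
    by_cases hzx : ltPair z x = true
    · simp only [if_pos hzx]
      obtain ⟨hmem, hmin⟩ := ih z
      refine ⟨?_, ?_⟩
      · rcases List.mem_cons.mp hmem with h1 | h1 <;> simp [h1]
      · intro y hy
        rcases List.mem_cons.mp hy with rfl | hy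
        · exact lePair_trans (hmin z (by simp)) (ltPair_le hzx)
        · exact hmin y hy
    · simp only [if_neg hzx]
      obtain ⟨hmem, hmin⟩ := ih x
      refine ⟨?_, ?_⟩
      · rcases List.mem_cons.mp hmem with h1 | h1 <;> simp [h1]
      · intro y hy
        rcases List.mem_cons.mp hy with rfl | hy
        · exact hmin y (by simp)
        · rcases List.mem_cons.mp hy with rfl | hy
          · exact lePair_trans (hmin x (by simp)) (ltPair_false_le hzx)
          · exact hmin y (by simp [hy])

theorem erase_beq (l : List (Int × Int)) (m : Int × Int) :
    l.erase m = @List.erase (Int × Int) instBEqOfDecidableEq l m := by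
  induction l with
  | nil => rfl
  | cons z t ih =>
    by_cases h : z = m
    · simp [List.erase_cons, h]
    · simp [List.erase_cons, h, ih]

theorem peek_eq_min {h : PHeap} {l : List (Int × Int)} (hord : h.Ordered)
    (hperm : h.contentsM = (l : Multiset (Int × Int))) : h.peek = listMinB l := by
  cases h with
  | nil =>
    have hl : l = [] := by
      have := hperm.symm
      simpa [PHeap.contentsM, Multiset.coe_eq_zero] using this
    simp [PHeap.peek, hl, listMinB]
  | node x hl hr =>
    cases l with
    | nil =>
      exfalso
      simp [PHeap.contentsM] at hperm
    | cons z rest =>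
      simp only [PHeap.peek, listMinB, Option.some.injEq]
      obtain ⟨hmem, hmin⟩ := listMinB_spec z rest
      set m := rest.foldl (fun m y => if ltPair y m then y else m) z with hm
      have hxin : x ∈ z :: rest := by
        have : x ∈ (PHeap.node x hl hr).contentsM := by simp [PHeap.contentsM]
        rw [hperm] at this
        exact Multiset.mem_coe.mp this
      have hmin' : m ∈ (PHeap.node x hl hr).contentsM := by
        rw [hperm]; exact Multiset.mem_coe.mpr hmem
      exact lePair_antisymm (ordered_root_le hord m hmin') (hmin x hxin)

theorem replace_contents {x : Int × Int} {hl hr : PHeap} (v : Int × Int) :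
    ((PHeap.node x hl hr).replace v).contentsM = hl.contentsM + hr.contentsM + {v} := by
  simp [PHeap.replace, push_contents, merge_contents]

theorem replace_ordered {x : Int × Int} {hl hr : PHeap}
    (hord : (PHeap.node x hl hr).Ordered) (v : Int × Int) :
    ((PHeap.node x hl hr).replace v).Ordered := by
  obtain ⟨_, h1, h2⟩ := hord
  exact push_ordered (merge_ordered h1 h2) v

theorem loop_eq (loose : List (Int × Int × String)) (a : Int) (friends : List String)
    (pos : Int) (h : PHeap) (l : List (Int × Int)) (hord : h.Ordered)
    (hperm : h.contentsM = (l : Multiset (Int × Int))) :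
    loopA loose a friends pos h = loopB loose a friends pos l := by
  induction loose generalizing a friends pos h l with
  | nil => simp [loopA, loopB]
  | cons x rest ih =>
    simp only [loopA, loopB]
    by_cases hx : x.1 ≤ a
    · simp only [if_pos hx]
      refine ih _ _ _ _ _ (push_ordered hord _) ?_
      rw [push_contents, hperm]
      rfl
    · simp only [if_neg hx]
      rw [← peek_eq_min hord hperm]
      cases hpk : h.peek with
      | none => exact ih _ _ _ _ _ hord hperm
      | some m =>
        obtain ⟨hl', hr', rfl⟩ : ∃ hl' hr', h = PHeap.node m hl' hr' := by
          cases h with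
          | nil => simp [PHeap.peek] at hpk
          | node y hl' hr' =>
            simp only [PHeap.peek, Option.some.injEq] at hpk
            exact ⟨hl', hr', by rw [hpk]⟩
        by_cases hlt : m.1 < x.2.1
        · simp only [if_pos hlt]
          have harith : a + x.2.1 - m.1 = a + (x.2.1 - m.1) := by ring
          rw [harith]
          refine ih _ _ _ _ _ (replace_ordered hord _) ?_
          rw [replace_contents]
          have h2 : ((l.erase m ++ [(x.2.1, m.2)] : List (Int × Int)) : Multiset (Int × Int)) =
              ((l.erase m : List (Int × Int)) : Multiset (Int × Int)) + {(x.2.1, m.2)} := rfl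
          have h3 : ((l.erase m : List (Int × Int)) : Multiset (Int × Int)) =
              ((l : List (Int × Int)) : Multiset (Int × Int)).erase m := by
            rw [erase_beq]; exact (Multiset.coe_erase l m).symm
          rw [h2, h3, ← hperm]
          simp [PHeap.contentsM]
        · simp only [if_neg hlt]
          exact ih _ _ _ _ _ hord hperm

theorem takeFriends_eq (a : Int) (xs : List (Int × Int × String)) :
    takeFriendsA a xs = takeFriendsB a xs := by
  induction xs generalizing a with
  | nil => rfl
  | cons x rest ih =>
    simp only [takeFriendsA, takeFriendsB]
    by_cases hx : x.1 ≤ a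
    · rw [if_pos hx, if_neg (by omega), ih]
    · rw [if_neg hx, if_pos (by omega)]

-- ===== VERDICT (by name: the statement is the Claim_ definition above) =====
theorem count_profit_spec : Claim_equal_count_profit := by
  intro a profit loose _
  unfold Spec_count_profit count_profit count_profit_alt
  simp only [takeFriends_eq]
  exact loop_eq _ _ _ _ _ _ trivial rfl
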